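-- pv_equiv track=rewrite | github.com/EmilioPeJu/problems | codefights/neighbouringElements.py | neighbouringElements
-- ===== SOURCE A (Python) =====
-- def neighbouringElements(a):
--     ans=0
--     for i in range(len(a)):
--         for j in range(len(a[0])):
--             if (i+1)<len(a) and a[i][j]==a[i+1][j]:
--                 ans+=1
--             if (j+1)<len(a[0]) and a[i][j]==a[i][j+1]:
--                 ans+=1
--     return ans
-- ===== SOURCE B (Python) =====
-- def neighbouringElements(a):
--     # Run-length view: in a line, equal adjacent pairs = length - number of maximal
--     # blocks of equal consecutive values.  Materialise every line of the grid (rows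
--     # clipped to the grid width m = len(a[0]), and the m columns) and sum per line.
--     def runs(seq):
--         cnt = 0
--         first = True
--         prev = None
--         for x in seq:
--             if first or x != prev:
--                 cnt += 1
--             first = False
--             prev = x
--         return cnt
--
--     if not a:
--         return 0
--     m = len(a[0])
--     cols = [[row[j] for row in a] for j in range(m)]
--     lines = [row[:m] for row in a] + cols
--     return sum(len(s) - runs(s) for s in lines)
-- ===== Notes on version B (the rewrite author's own statement) =====
-- stated objective: alternative
-- what changed: B works line-by-line instead of cell-by-cell: it materialises every line of the grid (the rows clipped to the grid width and the columns built by indexing), and counts each line's equal adjacent pairs via run-length structure as length minus the number of maximal blocks of equal consecutive values, summing over all lines; A instead walks every cell with an index double loop doing guarded right/down comparisons.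
import Mathlib
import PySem

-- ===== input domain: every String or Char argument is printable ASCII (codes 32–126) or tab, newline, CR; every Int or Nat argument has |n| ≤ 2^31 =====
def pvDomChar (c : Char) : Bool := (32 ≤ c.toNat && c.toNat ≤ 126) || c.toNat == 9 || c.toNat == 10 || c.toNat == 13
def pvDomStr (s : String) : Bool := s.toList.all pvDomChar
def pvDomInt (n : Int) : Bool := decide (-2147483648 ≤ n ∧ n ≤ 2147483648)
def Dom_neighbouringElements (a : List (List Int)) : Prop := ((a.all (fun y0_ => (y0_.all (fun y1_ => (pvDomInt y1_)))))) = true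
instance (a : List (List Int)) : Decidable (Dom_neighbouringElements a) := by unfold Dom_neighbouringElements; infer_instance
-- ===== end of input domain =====

-- B replaces A's per-cell guarded right/down index double loop by a line-based
-- run-length count: every grid line (rows clipped to the grid width, and the
-- materialised columns) contributes length minus its number of maximal equal
-- blocks; objective: alternative.

-- ===== PORT A =====
-- literal transliteration of A; indexing via pyGetD (all accesses are in range under Pre_)
def neighbouringElements (a : List (List Int)) : Int :=
  (PySem.List.pyRange 0 (a.length : Int)).foldl (fun ans i =>
    (PySem.List.pyRange 0 ((PySem.List.pyGetD a 0 []).length : Int)).foldl (fun ans j =>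
      let ans1 :=
        if i + 1 < (a.length : Int) ∧
            PySem.List.pyGetD (PySem.List.pyGetD a i []) j 0
              = PySem.List.pyGetD (PySem.List.pyGetD a (i + 1) []) j 0
        then ans + 1 else ans
      if j + 1 < ((PySem.List.pyGetD a 0 []).length : Int) ∧
          PySem.List.pyGetD (PySem.List.pyGetD a i []) j 0
            = PySem.List.pyGetD (PySem.List.pyGetD a i []) (j + 1) 0
      then ans1 + 1 else ans1) ans) 0

-- ===== PORT B =====
-- Source B's helper runs(seq): fold over (cnt, first, prev); Python's prev=None is
-- never compared while first is set, so a dummy 0 is exact.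
def pvRuns (seq : List Int) : Int :=
  (seq.foldl (fun (st : Int × Bool × Int) x =>
      (if st.2.1 = true ∨ x ≠ st.2.2 then st.1 + 1 else st.1, false, x))
    (0, true, 0)).1

-- transliteration of Source B; row[j] is getD and row[:m] is take (in range under Pre_)
def neighbouringElements_alt (a : List (List Int)) : Int :=
  match a with
  | [] => 0
  | r :: rest =>
    let m := r.length
    let cols := (List.range m).map (fun j => (r :: rest).map (fun row => row.getD j 0))
    let lines := (r :: rest).map (fun row => row.take m) ++ cols
    (lines.map (fun s => (s.length : Int) - pvRuns s)).sum

-- ===== PRECONDITION & SPEC =====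
-- Pre_ is exactly A's domain: on inputs where some row is shorter than the first row,
-- A raises IndexError; on everything else A returns.
def Pre_neighbouringElements (a : List (List Int)) : Prop :=
  ∀ r ∈ a, (a.headD []).length ≤ r.length
instance (a : List (List Int)) : Decidable (Pre_neighbouringElements a) := by
  unfold Pre_neighbouringElements; infer_instance

def pvWitness_neighbouringElements : List (List Int) := [[1, 1], [1, 2]]

def Spec_neighbouringElements (a : List (List Int)) (out : Int) : Prop :=
  out = neighbouringElements_alt a
instance (a : List (List Int)) (out : Int) : Decidable (Spec_neighbouringElements a out) := by
  unfold Spec_neighbouringElements; infer_instance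

-- ===== CLAIM (what is proved, stated in full; the proofs are below) =====
def Claim_equal_neighbouringElements : Prop :=
  ∀ (a : List (List Int)), Dom_neighbouringElements a → Pre_neighbouringElements a →
    Spec_neighbouringElements a (neighbouringElements a)

-- ===== LEMMAS AND PROOFS =====

-- vertical contribution of cell (i, j) in A's loop
def pvV (a : List (List Int)) (i j : Nat) : Int :=
  if i + 1 < a.length ∧ (a.getD i []).getD j 0 = (a.getD (i + 1) []).getD j 0 then 1 else 0

-- horizontal contribution of cell (i, j) in A's loop
def pvH (a : List (List Int)) (i j : Nat) : Int :=
  if j + 1 < (a.headD []).length ∧ (a.getD i []).getD j 0 = (a.getD i []).getD (j + 1) 0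
  then 1 else 0

lemma pv_foldl2_sum {α β : Type} (l1 : List α) (l2 : List β)
    (step : Int → α → β → Int) (g : α → β → Int)
    (h : ∀ x y acc, step acc x y = acc + g x y) :
    l1.foldl (fun acc x => l2.foldl (fun acc y => step acc x y) acc) 0
      = (l1.map (fun x => (l2.map (fun y => g x y)).sum)).sum := by
  have h2 : (fun (acc : Int) (x : α) => l2.foldl (fun acc y => step acc x y) acc)
      = fun acc x => acc + (l2.map (fun y => g x y)).sum := by
    funext acc x
    have : (fun (acc : Int) (y : β) => step acc x y) = fun acc y => acc + g x y := by
      funext acc y; exact h x y acc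
    rw [this, PySem.List.foldl_add]
  rw [h2, PySem.List.foldl_add]; simp

lemma pv_A_eq_sum (a : List (List Int)) :
    neighbouringElements a =
      ((List.range a.length).map (fun i =>
        ((List.range (a.headD []).length).map (fun j => pvV a i j + pvH a i j)).sum)).sum := by
  unfold neighbouringElements
  simp only [PySem.List.pyRange_zero_natCast, List.foldl_map, ← Nat.cast_succ,
    PySem.List.pyGetD_natCast, Nat.cast_lt]
  rw [show PySem.List.pyGetD a 0 [] = a.headD [] by
    cases a <;> simp [PySem.List.pyGetD, PySem.List.pyGet?, PySem.List.pyIdx?]]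
  refine pv_foldl2_sum _ _ _ _ ?_
  intro i j acc
  simp only [pvV, pvH]
  split_ifs <;> ring

lemma pv_map_getD_range {α : Type} (xs : List α) (d : α) :
    (List.range xs.length).map (fun i => xs.getD i d) = xs := by
  apply List.ext_getElem
  · simp
  · intro i h1 h2
    simp [List.getD_eq_getElem?_getD, List.getElem?_eq_getElem h2]

-- dropping the inner-loop guard 'j + 1 < m' shortens the range by one
lemma pv_sum_guard (m : Nat) (p : Nat → Prop) [DecidablePred p] :
    ((List.range m).map (fun j => if j + 1 < m ∧ p j then (1 : Int) else 0)).sum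
      = ((List.range (m - 1)).map (fun j => if p j then (1 : Int) else 0)).sum := by
  cases m with
  | zero => simp
  | succ k =>
    rw [List.range_succ]
    simp only [List.map_append, List.sum_append, List.map_cons, List.map_nil,
      List.sum_cons, List.sum_nil, Nat.add_sub_cancel]
    have h1 : (List.range k).map (fun j => if j + 1 < k + 1 ∧ p j then (1 : Int) else 0)
        = (List.range k).map (fun j => if p j then (1 : Int) else 0) := by
      apply List.map_congr_left
      intro j hj
      rw [List.mem_range] at hj
      exact if_congr ⟨fun h => h.2, fun h => ⟨by omega, h⟩⟩ rfl rfl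
    have h2 : (if k + 1 < k + 1 ∧ p k then (1 : Int) else 0) = 0 := by
      rw [if_neg]; rintro ⟨h, -⟩; omega
    rw [h1, h2]
    ring

-- the outer-loop guard 'i + 1 < n' factors out of the inner sum
lemma pv_guard_out {C : Prop} [Decidable C] (m : Nat) (q : Nat → Prop) [DecidablePred q] :
    ((List.range m).map (fun j => if C ∧ q j then (1 : Int) else 0)).sum
      = if C then ((List.range m).map (fun j => if q j then (1 : Int) else 0)).sum else 0 := by
  by_cases h : C <;> simp [h]

lemma pv_Vouter (F : List Int → List Int → Int) : ∀ (a : List (List Int)),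
    ((List.range a.length).map (fun i =>
      if i + 1 < a.length then F (a.getD i []) (a.getD (i + 1) []) else 0)).sum
      = ((a.zip (a.drop 1)).map (fun p => F p.1 p.2)).sum := by
  intro a
  induction a with
  | nil => simp
  | cons x xs ih =>
    cases xs with
    | nil => simp
    | cons y ys =>
      simp only [List.length_cons, List.range_succ_eq_map, List.map_cons, List.map_map,
        List.sum_cons, Function.comp_def, Nat.succ_eq_add_one, List.getD_cons_succ,
        List.getD_cons_zero, List.drop_succ_cons, List.drop_zero, List.zip_cons_cons] at ih ⊢
      have hhead : (if 0 + 1 + 1 < ys.length + 1 + 1 then F y (ys.getD 0 []) else 0)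
          = (if 0 + 1 < ys.length + 1 then F y (ys.getD 0 []) else 0) := by
        simp only [Nat.add_lt_add_iff_right]
      have hmap : (List.range ys.length).map
            (fun i => if i + 1 + 1 + 1 < ys.length + 1 + 1
              then F (ys.getD i []) (ys.getD (i + 1) []) else 0)
          = (List.range ys.length).map
            (fun i => if i + 1 + 1 < ys.length + 1
              then F (ys.getD i []) (ys.getD (i + 1) []) else 0) := by
        apply List.map_congr_left
        intro i _
        simp only [Nat.add_lt_add_iff_right]
      rw [hhead, hmap, ih]
      rw [show (if 0 + 1 < ys.length + 1 + 1 then F x y else 0) = F x y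
        from if_pos (by omega)]

-- A's total, rewritten as (per-row horizontal sums) + (per-row-pair vertical sums)
lemma pv_main (a : List (List Int)) :
    ((List.range a.length).map (fun i =>
      ((List.range (a.headD []).length).map (fun j => pvV a i j + pvH a i j)).sum)).sum
    = (a.map (fun row =>
        ((List.range ((a.headD []).length - 1)).map (fun j =>
          if row.getD j 0 = row.getD (j + 1) 0 then (1 : Int) else 0)).sum)).sum
      + ((a.zip (a.drop 1)).map (fun p =>
        ((List.range (a.headD []).length).map (fun j =>
          if p.1.getD j 0 = p.2.getD j 0 then (1 : Int) else 0)).sum)).sum := by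
  have hsplit : (List.range a.length).map (fun i =>
        ((List.range (a.headD []).length).map (fun j => pvV a i j + pvH a i j)).sum)
      = (List.range a.length).map (fun i =>
        ((List.range (a.headD []).length).map (fun j => pvV a i j)).sum
          + ((List.range (a.headD []).length).map (fun j => pvH a i j)).sum) := by
    apply List.map_congr_left
    intro i _
    exact PySem.List.sum_map_add_int _ _ _
  rw [hsplit, PySem.List.sum_map_add_int]
  have hH : ((List.range a.length).map (fun i =>
        ((List.range (a.headD []).length).map (fun j => pvH a i j)).sum)).sum
      = (a.map (fun row =>
        ((List.range ((a.headD []).length - 1)).map (fun j =>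
          if row.getD j 0 = row.getD (j + 1) 0 then (1 : Int) else 0)).sum)).sum := by
    have hcong : (List.range a.length).map (fun i =>
          ((List.range (a.headD []).length).map (fun j => pvH a i j)).sum)
        = (List.range a.length).map (fun i =>
          ((List.range ((a.headD []).length - 1)).map (fun j =>
            if (a.getD i []).getD j 0 = (a.getD i []).getD (j + 1) 0 then (1 : Int) else 0)).sum) := by
      apply List.map_congr_left
      intro i _
      simp only [pvH]
      exact pv_sum_guard _ _
    rw [hcong, show (List.range a.length).map (fun i =>
          ((List.range ((a.headD []).length - 1)).map (fun j =>
            if (a.getD i []).getD j 0 = (a.getD i []).getD (j + 1) 0 then (1 : Int) else 0)).sum)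
        = ((List.range a.length).map (fun i => a.getD i [])).map (fun row =>
          ((List.range ((a.headD []).length - 1)).map (fun j =>
            if row.getD j 0 = row.getD (j + 1) 0 then (1 : Int) else 0)).sum) by
      rw [List.map_map]; rfl, pv_map_getD_range]
  have hV : ((List.range a.length).map (fun i =>
        ((List.range (a.headD []).length).map (fun j => pvV a i j)).sum)).sum
      = ((a.zip (a.drop 1)).map (fun p =>
        ((List.range (a.headD []).length).map (fun j =>
          if p.1.getD j 0 = p.2.getD j 0 then (1 : Int) else 0)).sum)).sum := by
    have hcong : (List.range a.length).map (fun i =>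
          ((List.range (a.headD []).length).map (fun j => pvV a i j)).sum)
        = (List.range a.length).map (fun i =>
          if i + 1 < a.length then
            ((List.range (a.headD []).length).map (fun j =>
              if (a.getD i []).getD j 0 = (a.getD (i + 1) []).getD j 0 then (1 : Int) else 0)).sum
          else 0) := by
      apply List.map_congr_left
      intro i _
      simp only [pvV]
      exact pv_guard_out _ _
    rw [hcong]
    exact pv_Vouter (fun xs ys =>
      ((List.range (a.headD []).length).map (fun j =>
        if xs.getD j 0 = ys.getD j 0 then (1 : Int) else 0)).sum) a
  rw [hH, hV]
  ring

-- ---- characterisation of B's run-length count ----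

-- number of elements of s that differ from their predecessor (predecessor of the head is p)
def pvU (p : Int) : List Int → Int
  | [] => 0
  | x :: t => (if x = p then 0 else 1) + pvU x t

-- number of equal adjacent pairs of a list
def pvPairsEq : List Int → Int
  | x :: y :: t => (if x = y then 1 else 0) + pvPairsEq (y :: t)
  | _ => 0

lemma pv_runs_from (s : List Int) : ∀ (c : Int) (p : Int),
    (s.foldl (fun (st : Int × Bool × Int) x =>
        (if st.2.1 = true ∨ x ≠ st.2.2 then st.1 + 1 else st.1, false, x))
      (c, false, p)).1 = c + pvU p s := by
  induction s with
  | nil => intro c p; simp [pvU]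
  | cons x t ih =>
    intro c p
    simp only [List.foldl_cons, pvU]
    by_cases h : x = p
    · subst h
      rw [if_neg (by simp), if_pos rfl, ih, zero_add]
    · rw [if_pos (Or.inr h), if_neg h, ih]
      ring

lemma pv_runs_eq : ∀ (s : List Int), pvRuns s =
    match s with | [] => 0 | x :: t => 1 + pvU x t := by
  intro s
  cases s with
  | nil => rfl
  | cons x t =>
    unfold pvRuns
    simp only [List.foldl_cons]
    rw [if_pos (Or.inl trivial), zero_add]
    exact pv_runs_from t 1 x

lemma pv_len_split : ∀ (x : Int) (t : List Int),
    (t.length : Int) = pvU x t + pvPairsEq (x :: t) := by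
  intro x t
  induction t generalizing x with
  | nil => simp [pvU, pvPairsEq]
  | cons y t' ih =>
    simp only [List.length_cons, pvU, pvPairsEq]
    have := ih y
    by_cases h : x = y
    · rw [if_pos h.symm, if_pos h]; push_cast; omega
    · rw [if_neg (fun hy => h hy.symm), if_neg h]; push_cast; omega

-- B's per-line value is the number of equal adjacent pairs
lemma pv_line (s : List Int) : (s.length : Int) - pvRuns s = pvPairsEq s := by
  cases s with
  | nil => simp [pvRuns, pvPairsEq]
  | cons x t =>
    rw [pv_runs_eq]
    simp only [List.length_cons]
    have := pv_len_split x t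
    push_cast
    omega

-- pair count via positional indexing
lemma pv_pairsEq_getD : ∀ (s : List Int),
    pvPairsEq s = ((List.range (s.length - 1)).map (fun j =>
      if s.getD j 0 = s.getD (j + 1) 0 then (1 : Int) else 0)).sum := by
  intro s
  induction s with
  | nil => simp [pvPairsEq]
  | cons x t ih =>
    cases t with
    | nil => simp [pvPairsEq]
    | cons y t' =>
      simp only [pvPairsEq, List.length_cons, Nat.add_sub_cancel] at ih ⊢
      rw [List.range_succ_eq_map]
      simp only [List.map_cons, List.sum_cons, List.map_map, Function.comp_def,
        List.getD_cons_zero, List.getD_cons_succ]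
      rw [ih]
      refine congrArg (fun z => (if x = y then (1 : Int) else 0) + z) ?_
      apply congrArg
      apply List.map_congr_left
      intro j _
      rw [List.getD_cons_succ]

lemma pv_getD_take {α : Type} (s : List α) (m j : Nat) (d : α) (h : j < m) :
    (s.take m).getD j d = s.getD j d := by
  simp only [List.getD_eq_getElem?_getD, List.getElem?_take]
  rw [if_pos h]

-- pair count of a mapped list, over consecutive pairs of the original
lemma pv_pairsEq_map (f : List Int → Int) : ∀ (l : List (List Int)),
    pvPairsEq (l.map f)
      = ((l.zip (l.drop 1)).map (fun p => if f p.1 = f p.2 then (1 : Int) else 0)).sum := by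
  intro l
  induction l with
  | nil => simp [pvPairsEq]
  | cons x t ih =>
    cases t with
    | nil => simp [pvPairsEq]
    | cons y t' =>
      simp only [List.map_cons, pvPairsEq, List.drop_succ_cons, List.drop_zero,
        List.zip_cons_cons, List.sum_cons] at ih ⊢
      rw [ih]

-- exchange the order of a double list sum
lemma pv_sum_swap {α β : Type} (l1 : List α) (l2 : List β) (g : α → β → Int) :
    (l1.map (fun x => (l2.map (fun y => g x y)).sum)).sum
      = (l2.map (fun y => (l1.map (fun x => g x y)).sum)).sum := by
  induction l1 with
  | nil => simp
  | cons x t ih =>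
    simp only [List.map_cons, List.sum_cons, ih]
    rw [← PySem.List.sum_map_add_int]

-- ===== VERDICT (by name: the statement is the Claim_ definition above) =====
theorem neighbouringElements_spec : Claim_equal_neighbouringElements := by
  intro a _ hpre
  show neighbouringElements a = neighbouringElements_alt a
  cases a with
  | nil => decide
  | cons r rest =>
    rw [pv_A_eq_sum, pv_main]
    show _ = neighbouringElements_alt (r :: rest)
    simp only [neighbouringElements_alt, List.map_append, List.sum_append, List.map_map,
      Function.comp_def, List.headD_cons, pv_line]
    congr 1
    · -- horizontal parts
      apply congrArg
      apply List.map_congr_left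
      intro row hrow
      have hm : r.length ≤ row.length := by
        simpa using hpre row hrow
      rw [pv_pairsEq_getD]
      have hlen : (row.take r.length).length = r.length := by
        simp [Nat.min_eq_left hm]
      rw [hlen]
      apply congrArg
      apply List.map_congr_left
      intro j hj
      rw [List.mem_range] at hj
      rw [pv_getD_take _ _ _ _ (by omega), pv_getD_take _ _ _ _ (by omega)]
    · -- vertical parts: per-column pair counts, summed over columns, then swapped
      rw [show ((List.range r.length).map (fun j =>
            pvPairsEq ((r :: rest).map (fun row => row.getD j 0)))).sum
          = ((List.range r.length).map (fun j =>
            (((r :: rest).zip ((r :: rest).drop 1)).map (fun p =>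
              if p.1.getD j 0 = p.2.getD j 0 then (1 : Int) else 0)).sum)).sum by
        apply congrArg
        apply List.map_congr_left
        intro j _
        exact pv_pairsEq_map (fun row => row.getD j 0) (r :: rest)]
      rw [pv_sum_swap]
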